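-- pv_equiv track=rewrite | github.com/Cambricon/torch_mlu | test/torch_ops/test_baddbmm.py | shape_expand
-- ===== SOURCE A (Python) =====
-- import copy
--
-- def shape_expand(shape, new_dim):
--     """
--     expand B,N,M,P with new_dim==0 or 1
--     returns a list of [B,N,M,P],[B,N,M,new_dim] ... [new_dim, new_dim, new_dim, new_dim]
--     the result can broadcast or zerodims with origin shape
--     [[B,N,M,P]] -> [[B,N,M,0], [B,N,M,P], [B,N,0,P] ... ], 16 different shapes.
--     """
--     all_shapes = [shape]
--     for index in range(4):
--         tmp_shape = []
--         for shapes in all_shapes: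
--             t_new = copy.deepcopy(shapes)
--             t_ori = copy.deepcopy(shapes)
--             t_new[index] = new_dim
--             tmp_shape.append(copy.deepcopy(t_new))
--             tmp_shape.append(copy.deepcopy(t_ori))
--         all_shapes = copy.deepcopy(tmp_shape)
--         # for X from B to P:
--         # all_shapes = [..., [B,N,X,P], ...] -> [..., [B,N,new_dim,P], [B,N,X,P], ...]
--     return all_shapes
-- ===== SOURCE B (Python) =====
-- import copy
--
-- def shape_expand(shape, new_dim):
--     """
--     expand B,N,M,P with new_dim==0 or 1
--     returns the 16 broadcast/zero-dim variants, all-new_dim first,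
--     original shape last.
--     """
--     result = []
--     for k in range(16):
--         s = copy.deepcopy(shape)
--         for j in range(4):
--             if (k >> (3 - j)) & 1 == 0:
--                 s[j] = new_dim
--         result.append(s)
--     return result
-- ===== Notes on version B (the rewrite author's own statement) =====
-- stated objective: simpler
-- what changed: Replaces the level-by-level list-doubling (rebuilding and deep-copying the whole list of partial variants four times) with one direct loop over k=0..15 that derives each variant from k's bits, setting s[j]=new_dim exactly when bit (3-j) of k is 0.
import Mathlib
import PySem

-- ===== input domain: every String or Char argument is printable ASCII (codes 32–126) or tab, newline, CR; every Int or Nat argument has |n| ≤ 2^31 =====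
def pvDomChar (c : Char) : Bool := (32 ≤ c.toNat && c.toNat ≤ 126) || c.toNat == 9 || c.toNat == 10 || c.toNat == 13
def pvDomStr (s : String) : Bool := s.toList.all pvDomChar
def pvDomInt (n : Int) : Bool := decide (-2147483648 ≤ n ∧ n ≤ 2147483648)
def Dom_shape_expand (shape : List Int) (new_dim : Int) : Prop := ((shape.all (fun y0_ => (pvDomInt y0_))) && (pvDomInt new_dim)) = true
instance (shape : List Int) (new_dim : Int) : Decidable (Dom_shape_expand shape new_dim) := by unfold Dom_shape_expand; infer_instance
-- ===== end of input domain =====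

-- B replaces A's iterative list-doubling (with its many deepcopies) by a single
-- direct loop over k = 0..15 that reads off each variant from k's bits: simpler.

-- ===== PORT A =====
-- A: all_shapes = [shape]; for index in range(4): double each entry into
-- (entry with entry[index] = new_dim, entry). List.set is Python's s[index] = v
-- here because Pre_ guarantees 0 ≤ index < 4 ≤ len(shape).
def shape_expand (shape : List Int) (new_dim : Int) : List (List Int) :=
  (List.range 4).foldl
    (fun all_shapes index =>
      all_shapes.foldl
        (fun tmp_shape shapes => tmp_shape ++ [shapes.set index new_dim, shapes]) [])
    [shape]

-- ===== PORT B =====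
-- B: for k in range(16): s = copy of shape; for j in range(4): if bit (3-j) of k
-- is 0 then s[j] = new_dim; collect s.
def shape_expand_alt (shape : List Int) (new_dim : Int) : List (List Int) :=
  (List.range 16).map (fun k =>
    (List.range 4).foldl
      (fun s j => if (k >>> (3 - j)) % 2 == 0 then s.set j new_dim else s) shape)

-- ===== PRECONDITION & SPEC =====
-- A (and B) raise IndexError when len(shape) < 4; exactly those inputs are excluded.
def Pre_shape_expand (shape : List Int) (new_dim : Int) : Prop := 4 ≤ shape.length
instance (shape : List Int) (new_dim : Int) : Decidable (Pre_shape_expand shape new_dim) := by unfold Pre_shape_expand; infer_instance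
def pvWitness_shape_expand : List Int × Int := ([2, 3, 4, 5], 1)

def Spec_shape_expand (shape : List Int) (new_dim : Int) (out : List (List Int)) : Prop := out = shape_expand_alt shape new_dim
instance (shape : List Int) (new_dim : Int) (out : List (List Int)) : Decidable (Spec_shape_expand shape new_dim out) := by unfold Spec_shape_expand; infer_instance

-- ===== CLAIM (what is proved, stated in full; the proofs are below) =====
def Claim_equal_shape_expand : Prop := ∀ (shape : List Int) (new_dim : Int), Dom_shape_expand shape new_dim → Pre_shape_expand shape new_dim → Spec_shape_expand shape new_dim (shape_expand shape new_dim)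

-- ===== LEMMAS AND PROOFS =====

-- On a list with four explicit head elements both ports unfold to the same
-- literal 16-element list.
theorem shape_expand_cons4 (a b c d : Int) (t : List Int) (n : Int) :
    shape_expand (a :: b :: c :: d :: t) n = shape_expand_alt (a :: b :: c :: d :: t) n := by
  rfl

-- ===== VERDICT (by name: the statement is the Claim_ definition above) =====
theorem shape_expand_spec : Claim_equal_shape_expand := by
  intro shape new_dim _ hpre
  unfold Spec_shape_expand
  match shape, hpre with
  | a :: b :: c :: d :: t, _ => exact shape_expand_cons4 a b c d t new_dim
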